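-- pv_equiv track=rewrite | github.com/grupoprojetomd/projeto-criptografia | modulos/encontrarEquivalenteCifrado.py | dividirExpoenteEmPotencias
-- ===== SOURCE A (Python) =====
-- import math
--
-- def dividirExpoenteEmPotencias(expoente):
--     stringBinaria = bin(expoente)
--
--     stringBinaria = stringBinaria[2:]
--
--     stringBinariaInvertida = stringBinaria[::-1]
--
--     expoentes = []
--
--     k = 0
--     for caractere in stringBinariaInvertida:
--         if (caractere == '1'):
--             expoentes.append(k)
--
--         k += 1
--
--
--     partesDoExpoente = []
--     for expoente in expoentes:
--         parteDoExpoente = int(math.pow(2, expoente))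
--         partesDoExpoente.append(parteDoExpoente)
--
--     return partesDoExpoente
-- ===== SOURCE B (Python) =====
-- def dividirExpoenteEmPotencias(expoente):
--     n = abs(expoente)
--     partes = []
--     k = 0
--     while n != 0:
--         if n % 2 == 1:
--             partes.append(2 ** k)
--         n //= 2
--         k += 1
--     return partes
-- ===== Notes on version B (the rewrite author's own statement) =====
-- stated objective: simpler
-- what changed: B replaces A's binary-string construction (bin, slice, string reversal, a position-collecting loop, then a second loop mapping positions through math.pow) with a single arithmetic loop on the absolute value that tests the low bit, halves, and appends the corresponding power of two directly.
import Mathlib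
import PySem

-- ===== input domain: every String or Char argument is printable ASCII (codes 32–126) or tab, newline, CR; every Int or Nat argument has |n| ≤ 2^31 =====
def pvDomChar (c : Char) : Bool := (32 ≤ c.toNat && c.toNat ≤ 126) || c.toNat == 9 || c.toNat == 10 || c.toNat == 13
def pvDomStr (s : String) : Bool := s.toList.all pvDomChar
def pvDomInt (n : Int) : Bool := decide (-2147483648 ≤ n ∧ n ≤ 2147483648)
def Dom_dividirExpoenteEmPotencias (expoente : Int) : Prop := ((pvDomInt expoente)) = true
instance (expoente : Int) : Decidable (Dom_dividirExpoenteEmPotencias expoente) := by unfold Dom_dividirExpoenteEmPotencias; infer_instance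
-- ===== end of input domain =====

-- B replaces A's bin-string build/reverse/two-loop mapping with a single arithmetic low-bit loop; objective: simpler.


-- ===== PORT A =====
-- hand port of Python's bin(n) digit part for n : Nat (msb first; exact: repeated halving, '0' for n = 0)
def pvBinDigits (n : Nat) : List Char :=
  if h : n = 0 then []
  else pvBinDigits (n / 2) ++ [if n % 2 = 1 then '1' else '0']
decreasing_by exact Nat.div_lt_self (Nat.pos_of_ne_zero h) (by norm_num)

def pvBin (n : Nat) : List Char := if n = 0 then ['0'] else pvBinDigits n

-- int(math.pow(2, k)) is exactly 2^k for the positions reachable on Dom (k ≤ 32)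
def dividirExpoenteEmPotencias (expoente : Int) : List Int :=
  let stringBinaria : List Char :=
    if expoente < 0 then '-' :: '0' :: 'b' :: pvBin expoente.natAbs
    else '0' :: 'b' :: pvBin expoente.natAbs
  let stringBinaria2 := stringBinaria.drop 2
  let stringBinariaInvertida := stringBinaria2.reverse
  let p := stringBinariaInvertida.foldl
      (fun (st : List Nat × Nat) caractere =>
        (if caractere = '1' then st.1 ++ [st.2] else st.1, st.2 + 1)) ([], 0)
  let expoentes := p.1
  expoentes.foldl (fun acc e => acc ++ [(2 : Int) ^ e]) []

-- ===== PORT B =====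
def pvAltLoop (n k : Nat) (partes : List Int) : List Int :=
  if h : n = 0 then partes
  else pvAltLoop (n / 2) (k + 1) (if n % 2 = 1 then partes ++ [(2 : Int) ^ k] else partes)
decreasing_by exact Nat.div_lt_self (Nat.pos_of_ne_zero h) (by norm_num)

def dividirExpoenteEmPotencias_alt (expoente : Int) : List Int :=
  pvAltLoop expoente.natAbs 0 []

-- ===== PRECONDITION & SPEC =====
def Spec_dividirExpoenteEmPotencias (expoente : Int) (out : List Int) : Prop := out = dividirExpoenteEmPotencias_alt expoente
instance (expoente : Int) (out : List Int) : Decidable (Spec_dividirExpoenteEmPotencias expoente out) := by unfold Spec_dividirExpoenteEmPotencias; infer_instance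

-- ===== CLAIM (what is proved, stated in full; the proofs are below) =====
def Claim_equal_dividirExpoenteEmPotencias : Prop := ∀ (expoente : Int), Dom_dividirExpoenteEmPotencias expoente → Spec_dividirExpoenteEmPotencias expoente (dividirExpoenteEmPotencias expoente)

-- ===== LEMMAS AND PROOFS =====

-- bits of n, lsb first, as characters
def pvRbits (n : Nat) : List Char :=
  if h : n = 0 then []
  else (if n % 2 = 1 then '1' else '0') :: pvRbits (n / 2)
decreasing_by exact Nat.div_lt_self (Nat.pos_of_ne_zero h) (by norm_num)

-- positions (starting at k) of '1' characters
def pvOnes : List Char → Nat → List Nat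
  | [], _ => []
  | c :: cs, k => (if c = '1' then [k] else []) ++ pvOnes cs (k + 1)

theorem pvOnes_append_b (l : List Char) (k : Nat) : pvOnes (l ++ ['b']) k = pvOnes l k := by
  induction l generalizing k with
  | nil => simp [pvOnes]
  | cons c cs ih => simp [pvOnes, ih]

theorem foldl_collect (l : List Char) (acc : List Nat) (k : Nat) :
    l.foldl (fun (st : List Nat × Nat) caractere =>
        (if caractere = '1' then st.1 ++ [st.2] else st.1, st.2 + 1)) (acc, k)
      = (acc ++ pvOnes l k, k + l.length) := by
  induction l generalizing acc k with
  | nil => simp [pvOnes]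
  | cons c cs ih => by_cases hc : c = '1' <;> simp [pvOnes, ih, hc] <;> omega

theorem foldl_pow (l : List Nat) (acc : List Int) :
    l.foldl (fun acc e => acc ++ [(2 : Int) ^ e]) acc = acc ++ l.map (fun e => (2 : Int) ^ e) := by
  induction l generalizing acc with
  | nil => simp
  | cons e es ih => simp [ih]

theorem binDigits_reverse (n : Nat) : (pvBinDigits n).reverse = pvRbits n := by
  induction n using Nat.strong_induction_on with
  | _ n ih =>
    rw [pvBinDigits, pvRbits]
    by_cases h : n = 0
    · simp [h]
    · simp only [h, dif_neg, not_false_iff, List.reverse_append, List.reverse_cons,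
        List.reverse_nil, List.nil_append, List.singleton_append]
      rw [ih (n / 2) (Nat.div_lt_self (Nat.pos_of_ne_zero h) (by norm_num))]

theorem altLoop_eq (n : Nat) : ∀ (k : Nat) (acc : List Int),
    pvAltLoop n k acc = acc ++ (pvOnes (pvRbits n) k).map (fun e => (2 : Int) ^ e) := by
  induction n using Nat.strong_induction_on with
  | _ n ih =>
    intro k acc
    rw [pvAltLoop, pvRbits]
    by_cases h : n = 0
    · simp [h, pvOnes]
    · rw [dif_neg h, dif_neg h,
        ih (n / 2) (Nat.div_lt_self (Nat.pos_of_ne_zero h) (by norm_num))]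
      by_cases hm : n % 2 = 1 <;> simp [hm, pvOnes]

-- ===== VERDICT (by name: the statement is the Claim_ definition above) =====
theorem dividirExpoenteEmPotencias_spec : Claim_equal_dividirExpoenteEmPotencias := by
  intro e _
  show dividirExpoenteEmPotencias e = dividirExpoenteEmPotencias_alt e
  unfold dividirExpoenteEmPotencias dividirExpoenteEmPotencias_alt pvBin
  by_cases h0 : e.natAbs = 0
  · have : e = 0 := by omega
    subst this
    rw [pvAltLoop]
    norm_num [foldl_collect, pvOnes]
    decide
  · have hneg : ¬ e.natAbs = 0 := h0
    rw [altLoop_eq]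
    by_cases hlt : e < 0
    · simp only [hlt, if_pos, hneg, if_neg, not_false_iff, List.drop_succ_cons, List.drop_zero,
        List.reverse_cons, binDigits_reverse, foldl_collect, List.nil_append, pvOnes_append_b,
        foldl_pow]
    · simp only [hlt, if_neg, not_false_iff, hneg, List.drop_succ_cons, List.drop_zero,
        binDigits_reverse, foldl_collect, List.nil_append, foldl_pow]
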